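-- pv_equiv track=rewrite | github.com/PolocheTech/PROJECTS_PYTHON | ejercicio1.py | analizar_numeros
-- ===== SOURCE A (Python) =====
-- def analizar_numeros(lista_numeros):
--     numeros_pares = 0
--     numeros_impares = 0
--     promedio_numeros = 0
--     numero_mayor = 0
--     numero_menor = 1
--     for i in (lista_numeros):
--         if i % 2 == 0: numeros_pares += 1
--         elif i % 2 == 1: numeros_impares += 1
--         if i > numero_mayor: numero_mayor = i
--         if i < numero_menor: numero_menor = i
--         promedio_numeros += i
--     return numeros_pares, numeros_impares, numero_mayor, numero_menor, promedio_numeros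
-- ===== SOURCE B (Python) =====
-- def analizar_numeros(lista_numeros):
--     nums = list(lista_numeros)
--     pares = len([i for i in nums if i % 2 == 0])
--     impares = len([i for i in nums if i % 2 == 1])
--     mayor = max([0] + nums)
--     menor = min([1] + nums)
--     total = sum(nums)
--     return pares, impares, mayor, menor, total
-- ===== Notes on version B (the rewrite author's own statement) =====
-- stated objective: simpler
-- what changed: Replaces the single fused loop with five independent reductions: two filter/len counts, max/min over the list seeded with the original 0/1 start values, and sum.
import Mathlib
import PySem

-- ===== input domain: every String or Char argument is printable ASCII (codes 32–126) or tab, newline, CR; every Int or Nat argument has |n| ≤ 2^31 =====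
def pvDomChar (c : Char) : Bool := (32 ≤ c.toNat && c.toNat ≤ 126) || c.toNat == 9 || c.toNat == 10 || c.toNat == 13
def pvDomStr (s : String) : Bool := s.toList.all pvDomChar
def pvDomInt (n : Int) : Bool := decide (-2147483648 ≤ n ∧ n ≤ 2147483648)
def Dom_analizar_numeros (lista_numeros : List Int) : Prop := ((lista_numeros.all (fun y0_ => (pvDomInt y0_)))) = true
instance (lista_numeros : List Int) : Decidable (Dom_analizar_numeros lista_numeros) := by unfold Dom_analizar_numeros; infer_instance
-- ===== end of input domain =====

-- B replaces A's single fused accumulator loop by five independent reductions (two counts, max/min with the original 0/1 seeds, a sum); objective: simpler.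

-- ===== PORT A =====
-- one loop iteration of A: five accumulators, exactly A's branch order
def analizarStepA (st : Int × Int × Int × Int × Int) (i : Int) : Int × Int × Int × Int × Int :=
  let pares := st.1
  let impares := st.2.1
  let mayor := st.2.2.1
  let menor := st.2.2.2.1
  let prom := st.2.2.2.2
  let pi : Int × Int :=
    if PySem.Int.mod i 2 = 0 then (pares + 1, impares)
    else if PySem.Int.mod i 2 = 1 then (pares, impares + 1)
    else (pares, impares)
  let mayor := if i > mayor then i else mayor
  let menor := if i < menor then i else menor
  (pi.1, pi.2, mayor, menor, prom + i)

def analizar_numeros (lista_numeros : List Int) : Int × Int × Int × Int × Int :=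
  lista_numeros.foldl analizarStepA (0, 0, 0, 1, 0)

-- ===== PORT B =====
-- five independent reductions over the materialized list
def analizar_numeros_alt (lista_numeros : List Int) : Int × Int × Int × Int × Int :=
  let nums := lista_numeros
  let pares : Int := (nums.filter (fun i => PySem.Int.mod i 2 == 0)).length
  let impares : Int := (nums.filter (fun i => PySem.Int.mod i 2 == 1)).length
  let mayor : Int := (PySem.List.max? ((0 : Int) :: nums) (fun y => y)).getD 0
  let menor : Int := (PySem.List.min? ((1 : Int) :: nums) (fun y => y)).getD 1
  let total : Int := nums.sum
  (pares, impares, mayor, menor, total)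

-- ===== PRECONDITION & SPEC =====
def Spec_analizar_numeros (lista_numeros : List Int) (out : Int × Int × Int × Int × Int) : Prop := out = analizar_numeros_alt lista_numeros
instance (lista_numeros : List Int) (out : Int × Int × Int × Int × Int) : Decidable (Spec_analizar_numeros lista_numeros out) := by unfold Spec_analizar_numeros; infer_instance

-- ===== CLAIM (what is proved, stated in full; the proofs are below) =====
def Claim_equal_analizar_numeros : Prop := ∀ (lista_numeros : List Int), Dom_analizar_numeros lista_numeros → Spec_analizar_numeros lista_numeros (analizar_numeros lista_numeros)

-- ===== LEMMAS AND PROOFS =====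

theorem analizarStepA_even (p q m n s i : Int) (h0 : PySem.Int.mod i 2 = 0) :
    analizarStepA (p, q, m, n, s) i = (p + 1, q, max m i, min n i, s + i) := by
  have hm : (if i > m then i else m) = max m i := by rw [max_def]; split_ifs <;> omega
  have hn : (if i < n then i else n) = min n i := by rw [min_def]; split_ifs <;> omega
  simp only [analizarStepA]
  rw [if_pos h0, hm, hn]

theorem analizarStepA_odd (p q m n s i : Int) (h1 : PySem.Int.mod i 2 = 1) :
    analizarStepA (p, q, m, n, s) i = (p, q + 1, max m i, min n i, s + i) := by
  have hm : (if i > m then i else m) = max m i := by rw [max_def]; split_ifs <;> omega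
  have hn : (if i < n then i else n) = min n i := by rw [min_def]; split_ifs <;> omega
  simp only [analizarStepA]
  rw [if_neg (by omega), if_pos h1, hm, hn]

theorem analizar_loop_eq (l : List Int) : ∀ (p q m n s : Int),
    l.foldl analizarStepA (p, q, m, n, s)
    = (p + (l.countP (fun i => PySem.Int.mod i 2 == 0) : Int),
       q + (l.countP (fun i => PySem.Int.mod i 2 == 1) : Int),
       l.foldl max m, l.foldl min n, s + l.sum) := by
  induction l with
  | nil => intro p q m n s; simp
  | cons i t ih =>
    intro p q m n s
    simp only [List.foldl_cons, List.countP_cons, List.sum_cons]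
    rcases PySem.Int.mod_two_eq i with h | h
    · rw [analizarStepA_even _ _ _ _ _ _ h, ih, show (PySem.Int.mod i 2 == 0) = true from by rw [h]; rfl,
        show (PySem.Int.mod i 2 == 1) = false from by rw [h]; rfl]
      simp only [Prod.mk.injEq, if_true, Bool.false_eq_true, if_false, Nat.add_zero]
      refine ⟨by push_cast; ring, trivial, trivial, trivial, by ring⟩
    · rw [analizarStepA_odd _ _ _ _ _ _ h, ih, show (PySem.Int.mod i 2 == 0) = false from by rw [h]; rfl,
        show (PySem.Int.mod i 2 == 1) = true from by rw [h]; rfl]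
      simp only [Prod.mk.injEq, if_true, Bool.false_eq_true, if_false, Nat.add_zero]
      refine ⟨trivial, by push_cast; ring, trivial, trivial, by ring⟩

-- ===== VERDICT (by name: the statement is the Claim_ definition above) =====
theorem analizar_numeros_spec : Claim_equal_analizar_numeros := by
  intro l _
  unfold Spec_analizar_numeros analizar_numeros analizar_numeros_alt
  rw [analizar_loop_eq]
  simp [PySem.List.max?_id_cons, PySem.List.min?_id_cons, List.countP_eq_length_filter]
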